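-- pv_equiv track=rewrite | github.com/Hooorace-S/UniME | models/UniME/wrapper.py | _strip_known_prefixes
-- ===== SOURCE A (Python) =====
-- def _strip_known_prefixes(name: str) -> str:
--     prefixes = ("module.", "_orig_mod.", "backbone.", "tok_uniencoder.")
--     stripped = name
--     prefix_applied = True
--     while prefix_applied:
--         prefix_applied = False
--         for prefix in prefixes:
--             if stripped.startswith(prefix):
--                 stripped = stripped[len(prefix):]
--                 prefix_applied = True
--     return stripped
-- ===== SOURCE B (Python) =====
-- def _strip_known_prefixes(name: str) -> str:
--     for prefix in ("module.", "_orig_mod.", "backbone.", "tok_uniencoder."):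
--         if name.startswith(prefix):
--             return _strip_known_prefixes(name[len(prefix):])
--     return name
-- ===== Notes on version B (the rewrite author's own statement) =====
-- stated objective: simpler
-- what changed: Replaced A's while-loop with a prefix_applied flag and an inner for pass by a recursive fixed point that peels the first matching prefix and recurses on the remainder.
import Mathlib
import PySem

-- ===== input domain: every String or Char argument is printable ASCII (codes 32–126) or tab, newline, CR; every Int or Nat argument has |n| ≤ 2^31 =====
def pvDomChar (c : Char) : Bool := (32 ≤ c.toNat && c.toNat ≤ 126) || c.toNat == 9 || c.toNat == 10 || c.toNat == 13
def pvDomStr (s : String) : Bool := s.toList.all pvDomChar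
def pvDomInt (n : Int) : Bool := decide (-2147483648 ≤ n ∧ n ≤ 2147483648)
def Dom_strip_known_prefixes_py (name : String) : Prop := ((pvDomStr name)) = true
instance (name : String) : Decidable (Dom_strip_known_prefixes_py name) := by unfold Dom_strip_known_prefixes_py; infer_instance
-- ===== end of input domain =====

-- B replaces A's while-loop-with-flag by a recursive peel-one-prefix-and-recurse fixed point (objective: simpler).

-- ===== PORT A =====
-- the tuple ("module.", "_orig_mod.", "backbone.", "tok_uniencoder."), as lists of code points
def pvPrefixes : List (List Char) :=
  [['m','o','d','u','l','e','.'],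
   ['_','o','r','i','g','_','m','o','d','.'],
   ['b','a','c','k','b','o','n','e','.'],
   ['t','o','k','_','u','n','i','e','n','c','o','d','e','r','.']]

-- one iteration of A's inner 'for prefix in prefixes' body, on state (stripped, prefix_applied);
-- stripped[len(prefix):] with len(prefix) ≥ 0 is List.drop (exact: PySem.List.slice_from)
def pvStepA (st : List Char × Bool) (p : List Char) : List Char × Bool :=
  if PySem.Chars.startswith st.1 p then (st.1.drop p.length, true) else st

-- termination fact for the while loop: a pass never lengthens the string, and either
-- changes nothing (flag stays) or strictly shortens it with the flag set
lemma pvStepA_fold_spec : ∀ (ps : List (List Char)) (s : List Char) (b : Bool),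
    (∀ p ∈ ps, p ≠ []) →
    (ps.foldl pvStepA (s, b)).1.length ≤ s.length ∧
      (ps.foldl pvStepA (s, b) = (s, b) ∨
        ((ps.foldl pvStepA (s, b)).1.length < s.length ∧ (ps.foldl pvStepA (s, b)).2 = true)) := by
  intro ps
  induction ps with
  | nil => intro s b _; exact ⟨le_refl _, Or.inl rfl⟩
  | cons p ps ih =>
    intro s b hne
    simp only [List.foldl_cons]
    by_cases hm : PySem.Chars.startswith s p = true
    · have hps : p.length ≤ s.length := by
        have := (PySem.Chars.startswith_iff s p).mp hm
        exact this.length_le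
    -- hplen : p is nonempty
      have hplen : 0 < p.length := by
        have : p ≠ [] := hne p (List.mem_cons_self ..)
        exact List.length_pos_iff.mpr this
      have hlt : (s.drop p.length).length < s.length := by
        simp [List.length_drop]; omega
      have hstep : pvStepA (s, b) p = (s.drop p.length, true) := by
        simp [pvStepA, hm]
      rw [hstep]
      obtain ⟨h1, h2⟩ := ih (s.drop p.length) true (fun q hq => hne q (List.mem_cons_of_mem _ hq))
      refine ⟨le_trans h1 (le_of_lt hlt), Or.inr ⟨lt_of_le_of_lt h1 hlt, ?_⟩⟩
      rcases h2 with h2 | h2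
      · rw [h2]
      · exact h2.2
    · have hstep : pvStepA (s, b) p = (s, b) := by
        simp [pvStepA, hm]
      rw [hstep]
      exact ih s b (fun q hq => hne q (List.mem_cons_of_mem _ hq))

lemma pvPrefixes_ne_nil : ∀ p ∈ pvPrefixes, p ≠ [] := by decide

-- A's while loop: run one pass over the prefixes; if the flag got set, loop, else return
def pvStripA (s : List Char) : List Char :=
  let r := pvPrefixes.foldl pvStepA (s, false)
  if h : r.2 = true then pvStripA r.1 else r.1
  termination_by s.length
  decreasing_by
    have h' : (List.foldl pvStepA (s, false) pvPrefixes).2 = true := h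
    obtain ⟨_, h2⟩ := pvStepA_fold_spec pvPrefixes s false pvPrefixes_ne_nil
    rcases h2 with h2 | h2
    · rw [h2] at h'; simp at h'
    · exact h2.1

def strip_known_prefixes_py (name : String) : String :=
  String.ofList (pvStripA name.toList)

-- ===== PORT B =====
-- B's 'for prefix in …: if name.startswith(prefix): return recurse' is find?-then-recurse;
-- name[len(prefix):] with len(prefix) ≥ 0 is List.drop (exact: PySem.List.slice_from)
def pvStripB (s : List Char) : List Char :=
  match h : pvPrefixes.find? (fun p => PySem.Chars.startswith s p) with
  | some p => pvStripB (s.drop p.length)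
  | none => s
  termination_by s.length
  decreasing_by
    have hm : PySem.Chars.startswith s p = true := List.find?_some h
    have hp : p ∈ pvPrefixes := List.mem_of_find?_eq_some h
    have hps : p.length ≤ s.length :=
      ((PySem.Chars.startswith_iff s p).mp hm).length_le
    have hplen : 0 < p.length :=
      List.length_pos_iff.mpr (pvPrefixes_ne_nil p hp)
    simp [List.length_drop]; omega

def strip_known_prefixes_py_alt (name : String) : String :=
  String.ofList (pvStripB name.toList)

-- ===== PRECONDITION & SPEC =====
def Spec_strip_known_prefixes_py (name : String) (out : String) : Prop := out = strip_known_prefixes_py_alt name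
instance (name : String) (out : String) : Decidable (Spec_strip_known_prefixes_py name out) := by unfold Spec_strip_known_prefixes_py; infer_instance

-- ===== CLAIM (what is proved, stated in full; the proofs are below) =====
def Claim_equal_strip_known_prefixes_py : Prop := ∀ (name : String), Dom_strip_known_prefixes_py name → Spec_strip_known_prefixes_py name (strip_known_prefixes_py name)

-- ===== LEMMAS AND PROOFS =====

-- the four prefixes start with four distinct characters, so at most one of them
-- can be a prefix of any given string
lemma pvUniq (s : List Char) {p q : List Char} (hp : p ∈ pvPrefixes) (hq : q ∈ pvPrefixes)
    (h1 : PySem.Chars.startswith s p = true) (h2 : PySem.Chars.startswith s q = true) : p = q := by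
  rw [PySem.Chars.startswith_iff] at h1 h2
  simp only [pvPrefixes, List.mem_cons, List.not_mem_nil, or_false] at hp hq
  rcases hp with rfl | rfl | rfl | rfl <;> rcases hq with rfl | rfl | rfl | rfl <;>
    first
      | rfl
      | (exfalso; obtain ⟨t, rfl⟩ := h1; revert h2; simp [List.cons_prefix_cons])

-- if some known prefix matches s, B's find? returns exactly that prefix
lemma pvFind_of_match (s : List Char) {p : List Char} (hp : p ∈ pvPrefixes)
    (hm : PySem.Chars.startswith s p = true) :
    pvPrefixes.find? (fun q => PySem.Chars.startswith s q) = some p := by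
  have hsome : (pvPrefixes.find? (fun q => PySem.Chars.startswith s q)).isSome := by
    rw [List.find?_isSome]
    exact ⟨p, hp, hm⟩
  obtain ⟨q, hqeq⟩ := Option.isSome_iff_exists.mp hsome
  have hq : q ∈ pvPrefixes := List.mem_of_find?_eq_some hqeq
  have hqm : PySem.Chars.startswith s q = true := List.find?_some hqeq
  rw [hqeq, pvUniq s hq hp hqm hm]

-- stripping one matching known prefix does not change B's result
lemma pvStripB_peel (s : List Char) {p : List Char} (hp : p ∈ pvPrefixes)
    (hm : PySem.Chars.startswith s p = true) :
    pvStripB s = pvStripB (s.drop p.length) := by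
  rw [pvStripB, pvFind_of_match s hp hm]

-- B's result is invariant under one whole pass of A's inner for loop
lemma pvStripB_fold_inv : ∀ (ps : List (List Char)) (s : List Char) (b : Bool),
    (∀ p ∈ ps, p ∈ pvPrefixes) →
    pvStripB (ps.foldl pvStepA (s, b)).1 = pvStripB s := by
  intro ps
  induction ps with
  | nil => intro s b _; rfl
  | cons p ps ih =>
    intro s b hin
    simp only [List.foldl_cons]
    by_cases hm : PySem.Chars.startswith s p = true
    · have hstep : pvStepA (s, b) p = (s.drop p.length, true) := by simp [pvStepA, hm]
      rw [hstep, ih _ _ (fun q hq => hin q (List.mem_cons_of_mem _ hq)),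
        ← pvStripB_peel s (hin p (List.mem_cons_self ..)) hm]
    · have hstep : pvStepA (s, b) p = (s, b) := by simp [pvStepA, hm]
      rw [hstep]
      exact ih _ _ (fun q hq => hin q (List.mem_cons_of_mem _ hq))

-- once set, the flag stays set through the rest of the pass
lemma pvStepA_fold_true : ∀ (ps : List (List Char)) (st : List Char × Bool),
    st.2 = true → (ps.foldl pvStepA st).2 = true := by
  intro ps
  induction ps with
  | nil => intro st h; exact h
  | cons p ps ih =>
    intro st h
    simp only [List.foldl_cons]
    apply ih
    by_cases hm : PySem.Chars.startswith st.1 p = true <;> simp [pvStepA, hm, h]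

-- if a whole pass leaves the flag clear, no known prefix matched s
lemma pvFold_false : ∀ (ps : List (List Char)) (s : List Char),
    (ps.foldl pvStepA (s, false)).2 = false → ∀ p ∈ ps, PySem.Chars.startswith s p = false := by
  intro ps
  induction ps with
  | nil => intro s _ p hp; exact absurd hp (List.not_mem_nil)
  | cons p ps ih =>
    intro s hf q hq
    simp only [List.foldl_cons] at hf
    by_cases hm : PySem.Chars.startswith s p = true
    · exfalso
      have hstep : pvStepA (s, false) p = (s.drop p.length, true) := by simp [pvStepA, hm]
      rw [hstep, pvStepA_fold_true ps _ rfl] at hf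
      exact absurd hf (by simp)
    · have hstep : pvStepA (s, false) p = (s, false) := by simp [pvStepA, hm]
      rw [hstep] at hf
      rcases List.mem_cons.mp hq with rfl | hq'
      · exact eq_false_of_ne_true hm
      · exact ih s hf q hq'

-- the two loop shapes compute the same string
theorem pvStripA_eq_pvStripB (s : List Char) : pvStripA s = pvStripB s := by
  rw [pvStripA]
  by_cases h : (pvPrefixes.foldl pvStepA (s, false)).2 = true
  · have hlt : (pvPrefixes.foldl pvStepA (s, false)).1.length < s.length := by
      obtain ⟨_, h2⟩ := pvStepA_fold_spec pvPrefixes s false pvPrefixes_ne_nil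
      rcases h2 with h2 | h2
      · rw [h2] at h; simp at h
      · exact h2.1
    rw [dif_pos h, pvStripA_eq_pvStripB (pvPrefixes.foldl pvStepA (s, false)).1,
      pvStripB_fold_inv pvPrefixes s false (fun _ hp => hp)]
  · rw [dif_neg h]
    have hnone : pvPrefixes.find? (fun q => PySem.Chars.startswith s q) = none := by
      rw [List.find?_eq_none]
      intro p hp
      simp [pvFold_false pvPrefixes s (eq_false_of_ne_true h) p hp]
    obtain ⟨h1, h2⟩ := pvStepA_fold_spec pvPrefixes s false pvPrefixes_ne_nil
    rcases h2 with h2 | h2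
    · rw [h2, pvStripB, hnone]
    · exact absurd h2.2 h
  termination_by s.length
  decreasing_by exact hlt

-- ===== VERDICT (by name: the statement is the Claim_ definition above) =====
theorem strip_known_prefixes_py_spec : Claim_equal_strip_known_prefixes_py := by
  intro name _
  unfold Spec_strip_known_prefixes_py strip_known_prefixes_py strip_known_prefixes_py_alt
  rw [pvStripA_eq_pvStripB]
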